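-- pv_equiv track=rewrite | github.com/rvcarrera/codecademy | censor_project/censor_dispenser.py | censor_four
-- ===== SOURCE A (Python) =====
-- def censor_four(text, word_list1, word_list2):
--     censor_list = word_list1 + word_list2
--     clean_censor_list = [item.split(' ') for item in censor_list]
--     splited_text = text.split(' ')
--     st_to_censor_index = []
--     for st_index in range(len(splited_text)):
--         word = splited_text[st_index].lower()
--         for ccl_index in range(len(clean_censor_list)):
--             word_to_censor = clean_censor_list[ccl_index]
--             if len(word_to_censor) == 1:
--                 if word == word_to_censor[0]:
--                     st_to_censor_index.append(st_index - 1)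
--                     st_to_censor_index.append(st_index)
--                     st_to_censor_index.append(st_index + 1)
--             else:
--                 if word == word_to_censor[0] and splited_text[st_index + 1].lower() == word_to_censor[1]:
--                     st_to_censor_index.append(st_index - 1)
--                     st_to_censor_index.append(st_index)
--                     st_to_censor_index.append(st_index + 1)
--                     st_to_censor_index.append(st_index + 2)
--     for index in st_to_censor_index:
--         splited_text[index] = '*****'
--     return ' '.join(splited_text)
-- ===== SOURCE B (Python) =====
-- def censor_four(text, word_list1, word_list2):
--     words = text.split(' ')
--     n = len(words)
--     by_first = {}
--     for phrase in word_list1 + word_list2: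
--         toks = phrase.split(' ')
--         by_first.setdefault(toks[0], []).append(toks)
--     marked = set()
--     for i, w in enumerate(words):
--         for toks in by_first.get(w.lower(), []):
--             if len(toks) == 1:
--                 marked.update(range(max(i - 1, 0), min(i + 2, n)))
--             elif i + 1 < n and words[i + 1].lower() == toks[1]:
--                 marked.update(range(max(i - 1, 0), min(i + 3, n)))
--     return ' '.join('*****' if i in marked else w for i, w in enumerate(words))
-- ===== Notes on version B (the rewrite author's own statement) =====
-- stated objective: alternative
-- what changed: B indexes the censor phrases in a dict keyed by their first token so each word does one lookup instead of scanning every phrase, collects censored positions in a set of clamped neighbour ranges, and renders the output with a join over enumerate instead of A's in-place writes through possibly negative indices.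
-- intended difference: On texts whose first word starts a match, A appends index -1 and Python's negative indexing censors the LAST word of the text; B censors only the existing neighbours of the match, which is the intended fuzzy-masking behaviour. — e.g. on censor_four("bad cat dog", ["bad"], []): A returns "***** ***** *****", B returns "***** ***** dog"
import Mathlib
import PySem

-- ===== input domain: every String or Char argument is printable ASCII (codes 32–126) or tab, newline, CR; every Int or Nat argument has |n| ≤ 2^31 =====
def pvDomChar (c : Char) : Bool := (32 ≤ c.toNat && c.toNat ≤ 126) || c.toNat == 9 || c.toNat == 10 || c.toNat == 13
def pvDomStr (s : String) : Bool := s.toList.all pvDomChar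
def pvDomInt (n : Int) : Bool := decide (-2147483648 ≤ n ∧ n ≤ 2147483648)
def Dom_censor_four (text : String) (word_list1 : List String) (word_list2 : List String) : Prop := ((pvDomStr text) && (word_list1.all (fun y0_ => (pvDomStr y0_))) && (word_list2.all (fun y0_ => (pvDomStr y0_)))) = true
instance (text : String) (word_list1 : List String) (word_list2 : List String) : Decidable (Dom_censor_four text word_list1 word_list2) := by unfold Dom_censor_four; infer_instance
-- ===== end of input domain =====

-- B replaces A's scan of every censor phrase for every word by a dict keyed on each phrase's
-- first token (one lookup per word) and marks neighbour indices in a set instead of writing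
-- in-place through possibly negative list indices; objective: alternative (same measured cost).

-- s.split(' ') — sep is non-empty, so this is Python's exact split (PySem.Chars.splitOn)
def pvSplit (s : String) : List String :=
  (PySem.Chars.splitOn s.toList [' ']).map String.ofList

-- ===== PORT A =====
def censor_four (text : String) (word_list1 : List String) (word_list2 : List String) : String :=
  let censor_list := word_list1 ++ word_list2
  let clean_censor_list := censor_list.map (fun item => pvSplit item)
  let splited_text := pvSplit text
  let st_to_censor_index :=
    (PySem.List.pyRange 0 (PySem.List.len splited_text) 1).foldl (fun acc st_index =>
      let word := PySem.Str.lower (PySem.List.pyGetD splited_text st_index "")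
      (PySem.List.pyRange 0 (PySem.List.len clean_censor_list) 1).foldl (fun acc ccl_index =>
        let word_to_censor := PySem.List.pyGetD clean_censor_list ccl_index []
        if PySem.List.len word_to_censor == 1 then
          if word == PySem.List.pyGetD word_to_censor 0 "" then
            acc ++ [st_index - 1, st_index, st_index + 1]
          else acc
        else
          -- splited_text[st_index + 1]: raises in Python when st_index is the last index and the
          -- first token matches; Pre_censor_four excludes exactly those inputs
          if word == PySem.List.pyGetD word_to_censor 0 "" &&
             (PySem.Str.lower (PySem.List.pyGetD splited_text (st_index + 1) "") == PySem.List.pyGetD word_to_censor 1 "") then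
            acc ++ [st_index - 1, st_index, st_index + 1, st_index + 2]
          else acc) acc) ([] : List Int)
  let final := st_to_censor_index.foldl (fun l index => PySem.List.pySetD l index "*****") splited_text
  PySem.Str.join " " final

-- ===== PORT B =====
def censor_four_alt (text : String) (word_list1 : List String) (word_list2 : List String) : String :=
  let words := pvSplit text
  let n := PySem.List.len words
  let by_first := (word_list1 ++ word_list2).foldl (fun d phrase =>
      let toks := pvSplit phrase
      d.modify (PySem.List.pyGetD toks 0 "") [] (fun l => l ++ [toks]))
    (PySem.Dict.empty (κ := String) (ν := List (List String)))
  let marked := (PySem.List.enumerate words).foldl (fun s iw =>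
      (by_first.getD (PySem.Str.lower iw.2) []).foldl (fun s toks =>
        if PySem.List.len toks == 1 then
          PySem.Set.update s (PySem.List.pyRange (max (iw.1 - 1) 0) (min (iw.1 + 2) n) 1)
        else if decide (iw.1 + 1 < n) &&
                (PySem.Str.lower (PySem.List.pyGetD words (iw.1 + 1) "") == PySem.List.pyGetD toks 1 "") then
          PySem.Set.update s (PySem.List.pyRange (max (iw.1 - 1) 0) (min (iw.1 + 3) n) 1)
        else s) s)
    (PySem.Set.empty (α := Int))
  PySem.Str.join " " ((PySem.List.enumerate words).map (fun iw =>
    if PySem.Set.contains marked iw.1 then "*****" else iw.2))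

-- ===== PRECONDITION & SPEC =====
-- closed-form match predicates over the input's word list / tokenised censor list
def pvPhrases (word_list1 : List String) (word_list2 : List String) : List (List String) :=
  word_list1.map pvSplit ++ word_list2.map pvSplit

-- word i (lower-cased) equals token j of censor phrase p
def PvTok (ws : List String) (i : Nat) (p : List String) (j : Nat) : Prop :=
  PySem.Str.lower (ws.getD i "") = PySem.List.pyGetD p j ""
-- a one-token censor phrase matches word i
def PvMatch1 (ws : List String) (phr : List (List String)) (i : Nat) : Prop :=
  ∃ p ∈ phr, p.length = 1 ∧ PvTok ws i p 0
-- a multi-token censor phrase matches words i, i+1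
def PvMatch2 (ws : List String) (phr : List (List String)) (i : Nat) : Prop :=
  ∃ p ∈ phr, p.length ≠ 1 ∧ PvTok ws i p 0 ∧ PvTok ws (i + 1) p 1
-- a multi-token censor phrase's FIRST token matches word i
def PvMatchM0 (ws : List String) (phr : List (List String)) (i : Nat) : Prop :=
  ∃ p ∈ phr, p.length ≠ 1 ∧ PvTok ws i p 0

-- Pre_ excludes exactly the inputs where Python A raises IndexError: a multi-token phrase whose
-- first token matches the last word (out-of-range read), a one-token match on the last word or a
-- two-token match on the word before it (out-of-range write).
def Pre_censor_four (text : String) (word_list1 : List String) (word_list2 : List String) : Prop :=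
  let ws := pvSplit text
  let phr := pvPhrases word_list1 word_list2
  ¬ PvMatchM0 ws phr (ws.length - 1) ∧ ¬ PvMatch1 ws phr (ws.length - 1) ∧
    ¬(2 ≤ ws.length ∧ PvMatch2 ws phr (ws.length - 2))
instance (text : String) (word_list1 : List String) (word_list2 : List String) : Decidable (Pre_censor_four text word_list1 word_list2) := by unfold Pre_censor_four PvMatchM0 PvMatch1 PvMatch2 PvTok; infer_instance

def pvWitness_censor_four : String × List String × List String := ("hello there friend", ["there"], [])

-- On texts whose FIRST word starts a match, A appends index -1 and Python's negative indexing
-- makes it censor the LAST word of the text; B censors only the existing left neighbours, which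
-- is the intended 'mask the neighbours' behaviour.
def D_censor_four (text : String) (word_list1 : List String) (word_list2 : List String) : Prop :=
  let ws := pvSplit text
  let phr := pvPhrases word_list1 word_list2
  2 ≤ ws.length ∧ (PvMatch1 ws phr 0 ∨ PvMatch2 ws phr 0) ∧
    ws.getLast? ≠ some "*****" ∧ ¬ PvMatch1 ws phr (ws.length - 2) ∧
    (ws.length = 2 ∨ ¬ PvMatch2 ws phr (ws.length - 3))
instance (text : String) (word_list1 : List String) (word_list2 : List String) : Decidable (D_censor_four text word_list1 word_list2) := by unfold D_censor_four PvMatch1 PvMatch2 PvTok; infer_instance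

def Spec_censor_four (text : String) (word_list1 : List String) (word_list2 : List String) (out : String) : Prop := ¬ D_censor_four text word_list1 word_list2 → out = censor_four_alt text word_list1 word_list2
instance (text : String) (word_list1 : List String) (word_list2 : List String) (out : String) : Decidable (Spec_censor_four text word_list1 word_list2 out) := by unfold Spec_censor_four; infer_instance

def pvDiffWitness_censor_four : String × List String × List String := ("bad cat dog", ["bad"], [])
def pvDiffWitnessOut_censor_four : String × String := ("***** ***** *****", "***** ***** dog")

-- ===== CLAIM (what is proved, stated in full; the proofs are below) =====
def Claim_unchanged_censor_four : Prop := ∀ (text : String) (word_list1 : List String) (word_list2 : List String), Dom_censor_four text word_list1 word_list2 → Pre_censor_four text word_list1 word_list2 → Spec_censor_four text word_list1 word_list2 (censor_four text word_list1 word_list2)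
def Claim_exact_censor_four : Prop := ∀ (text : String) (word_list1 : List String) (word_list2 : List String), Dom_censor_four text word_list1 word_list2 → Pre_censor_four text word_list1 word_list2 → D_censor_four text word_list1 word_list2 → censor_four text word_list1 word_list2 ≠ censor_four_alt text word_list1 word_list2
def Claim_changed_censor_four : Prop := Dom_censor_four (pvDiffWitness_censor_four.1) (pvDiffWitness_censor_four.2.1) (pvDiffWitness_censor_four.2.2) ∧ Pre_censor_four (pvDiffWitness_censor_four.1) (pvDiffWitness_censor_four.2.1) (pvDiffWitness_censor_four.2.2) ∧ D_censor_four (pvDiffWitness_censor_four.1) (pvDiffWitness_censor_four.2.1) (pvDiffWitness_censor_four.2.2) ∧ censor_four (pvDiffWitness_censor_four.1) (pvDiffWitness_censor_four.2.1) (pvDiffWitness_censor_four.2.2) = pvDiffWitnessOut_censor_four.1 ∧ censor_four_alt (pvDiffWitness_censor_four.1) (pvDiffWitness_censor_four.2.1) (pvDiffWitness_censor_four.2.2) = pvDiffWitnessOut_censor_four.2 ∧ pvDiffWitnessOut_censor_four.1 ≠ pvDiffWitnessOut_censor_four.2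

-- ===== LEMMAS AND PROOFS =====

-- A's read of splited_text[i+1] never matches outside Pre_, so a PvMatchM0 failure kills PvMatch2
lemma matchM0_not (ws : List String) (phr : List (List String)) (i : Nat)
    (h : ¬ PvMatchM0 ws phr i) : ¬ PvMatch2 ws phr i := by
  rintro ⟨p, hp, hl, he1, _⟩
  exact h ⟨p, hp, hl, he1⟩

-- ---- A-side characterisation ----

-- the index list A's first double loop collects, over an abstract word list / tokenised censor list
def AIdx (ws : List String) (phr : List (List String)) : List Int :=
  (PySem.List.pyRange 0 (PySem.List.len ws) 1).foldl (fun acc st_index =>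
    let word := PySem.Str.lower (PySem.List.pyGetD ws st_index "")
    (PySem.List.pyRange 0 (PySem.List.len phr) 1).foldl (fun acc ccl_index =>
      let word_to_censor := PySem.List.pyGetD phr ccl_index []
      if PySem.List.len word_to_censor == 1 then
        if word == PySem.List.pyGetD word_to_censor 0 "" then
          acc ++ [st_index - 1, st_index, st_index + 1]
        else acc
      else
        if word == PySem.List.pyGetD word_to_censor 0 "" &&
           (PySem.Str.lower (PySem.List.pyGetD ws (st_index + 1) "") == PySem.List.pyGetD word_to_censor 1 "") then
          acc ++ [st_index - 1, st_index, st_index + 1, st_index + 2]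
        else acc) acc) ([] : List Int)

def ARun (ws : List String) (phr : List (List String)) : String :=
  PySem.Str.join " " ((AIdx ws phr).foldl (fun l index => PySem.List.pySetD l index "*****") ws)

lemma pvPhrases_eq (w1 w2 : List String) :
    pvPhrases w1 w2 = (w1 ++ w2).map pvSplit := (List.map_append ..).symm

lemma censor_four_eq (text : String) (w1 w2 : List String) :
    censor_four text w1 w2 = ARun (pvSplit text) (pvPhrases w1 w2) := by
  rw [pvPhrases_eq]
  rfl

-- what word i contributes for censor phrase p in A's loop
def pvContrib (ws : List String) (i : Nat) (p : List String) : List Int :=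
  if PySem.List.len p == 1 then
    (if PySem.Str.lower (ws.getD i "") == PySem.List.pyGetD p 0 "" then
      [(i : Int) - 1, (i : Int), (i : Int) + 1] else [])
  else
    (if PySem.Str.lower (ws.getD i "") == PySem.List.pyGetD p 0 "" &&
        (PySem.Str.lower (ws.getD (i + 1) "") == PySem.List.pyGetD p 1 "") then
      [(i : Int) - 1, (i : Int), (i : Int) + 1, (i : Int) + 2] else [])

lemma foldl_two_ite_append {α β : Type} (c1 c2 c3 : α → Bool) (u v : α → List β)
    (l : List α) (acc : List β) :
    l.foldl (fun acc x => if c1 x then (if c2 x then acc ++ u x else acc)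
      else (if c3 x then acc ++ v x else acc)) acc
      = acc ++ l.flatMap (fun x => if c1 x then (if c2 x then u x else [])
          else (if c3 x then v x else [])) := by
  induction l generalizing acc with
  | nil => simp
  | cons a t ih => simp only [List.foldl_cons, List.flatMap_cons, ih]; split_ifs <;> simp

lemma flatMap_range_getD {α β : Type} (l : List α) (d : α) (g : α → List β) :
    (List.range l.length).flatMap (fun c => g (l.getD c d)) = l.flatMap g := by
  induction l with
  | nil => simp
  | cons a t ih =>
      simp only [List.length_cons, List.range_succ_eq_map, List.flatMap_cons, List.flatMap_map]
      simp only [List.getD_cons_zero, Nat.succ_eq_add_one, List.getD_cons_succ, ih]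

lemma AIdx_eq (ws : List String) (phr : List (List String)) :
    AIdx ws phr = (List.range ws.length).flatMap (fun i => phr.flatMap (pvContrib ws i)) := by
  unfold AIdx
  simp only [PySem.List.len_eq, PySem.List.pyRange_zero_natCast, List.foldl_map,
    PySem.List.pyGetD_natCast]
  simp only [show ∀ k : Nat, ((k : Int) + 1) = ((k + 1 : Nat) : Int) from fun k => by push_cast; ring,
    PySem.List.pyGetD_natCast]
  have hinner : ∀ (k : Nat) (acc : List Int),
      (List.range phr.length).foldl (fun acc c =>
        if (((phr.getD c []).length : Int) == 1) then
          if PySem.Str.lower (ws.getD k "") == PySem.List.pyGetD (phr.getD c []) 0 "" then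
            acc ++ [(k : Int) - 1, (k : Int), ((k + 1 : Nat) : Int)]
          else acc
        else
          if PySem.Str.lower (ws.getD k "") == PySem.List.pyGetD (phr.getD c []) 0 "" &&
             (PySem.Str.lower (ws.getD (k + 1) "") == PySem.List.pyGetD (phr.getD c []) 1 "") then
            acc ++ [(k : Int) - 1, (k : Int), ((k + 1 : Nat) : Int), (k : Int) + 2]
          else acc) acc
      = acc ++ phr.flatMap (pvContrib ws k) := by
    intro k acc
    exact (foldl_two_ite_append _ _ _ _ _ _ acc).trans
      (by rw [← flatMap_range_getD phr [] (pvContrib ws k)]; rfl)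
  rw [PySem.List.foldl_congr_mem _ _ (fun acc k => acc ++ phr.flatMap (pvContrib ws k)) _
    (fun acc k _ => hinner k acc)]
  rw [PySem.List.foldl_append_eq_flatMap, List.nil_append]

lemma mem_AIdx (ws : List String) (phr : List (List String)) (j : Int) :
    j ∈ AIdx ws phr ↔ ∃ i : Nat, i < ws.length ∧ ∃ p ∈ phr, j ∈ pvContrib ws i p := by
  simp [AIdx_eq, List.mem_flatMap, List.mem_range]

-- ---- the write loop, pointwise ----

lemma getElem?_pySetD {α : Type} (xs : List α) (i : Int) (v : α) (j : Nat) (hj : j < xs.length) :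
    (PySem.List.pySetD xs i v)[j]? =
      if i = (j : Int) ∨ i = (j : Int) - (xs.length : Int) then some v else xs[j]? := by
  unfold PySem.List.pySetD PySem.List.pySet? PySem.List.pyIdx?
  by_cases h0 : (0 : Int) ≤ i
  · by_cases hl : i < (xs.length : Int)
    · simp only [h0, hl, if_pos, Option.map_some, Option.getD_some, List.getElem?_set]
      by_cases he : i = (j : Int)
      · simp [he, hj]
      · have : ¬ (i = (j : Int) ∨ i = (j : Int) - (xs.length : Int)) := by omega
        have h2 : i.toNat ≠ j := by omega
        simp [this, h2]
    · have : ¬ (i = (j : Int) ∨ i = (j : Int) - (xs.length : Int)) := by omega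
      simp [h0, hl, this]
  · by_cases hm : -(xs.length : Int) ≤ i
    · simp only [h0, hm, if_pos, Option.map_some, Option.getD_some, List.getElem?_set, if_false]
      by_cases he : i = (j : Int) - (xs.length : Int)
      · have h2 : xs.length - (-i).toNat = j := by omega
        have : i = (j : Int) ∨ i = (j : Int) - (xs.length : Int) := Or.inr he
        simp [this, h2, hj]
      · have hno : ¬ (i = (j : Int) ∨ i = (j : Int) - (xs.length : Int)) := by omega
        have h2 : xs.length - (-i).toNat ≠ j := by omega
        simp [hno, h2]
    · have : ¬ (i = (j : Int) ∨ i = (j : Int) - (xs.length : Int)) := by omega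
      simp [h0, hm, this]

lemma length_writes (I : List Int) (ws : List String) :
    (I.foldl (fun l index => PySem.List.pySetD l index "*****") ws).length = ws.length := by
  induction I generalizing ws with
  | nil => rfl
  | cons a t ih => simp [List.foldl_cons, ih, PySem.List.length_pySetD]

lemma getElem?_writes (I : List Int) (ws : List String) (j : Nat) (hj : j < ws.length) :
    (I.foldl (fun l index => PySem.List.pySetD l index "*****") ws)[j]? =
      if (∃ i ∈ I, i = (j : Int) ∨ i = (j : Int) - (ws.length : Int)) then some "*****"
      else ws[j]? := by
  induction I generalizing ws with
  | nil => simp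
  | cons a t ih =>
      have hlen : (PySem.List.pySetD ws a "*****").length = ws.length := PySem.List.length_pySetD ..
      rw [List.foldl_cons, ih _ (by omega), getElem?_pySetD ws a "*****" j hj]
      by_cases h1 : ∃ i ∈ t, i = (j : Int) ∨ i = (j : Int) - (ws.length : Int)
      · rw [if_pos (by rw [hlen]; exact h1), if_pos (by simpa using Or.inr h1)]
      · rw [if_neg (by rw [hlen]; exact h1)]
        by_cases h2 : a = (j : Int) ∨ a = (j : Int) - (ws.length : Int)
        · rw [if_pos h2, if_pos ⟨a, List.mem_cons_self .., h2⟩]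
        · rw [if_neg h2, if_neg (by
            rintro ⟨i, hi, h⟩
            rcases List.mem_cons.1 hi with rfl | hi
            · exact h2 h
            · exact h1 ⟨i, hi, h⟩)]

-- ---- B-side characterisation ----

def BDict (phr : List (List String)) : PySem.Dict String (List (List String)) :=
  phr.foldl (fun d toks => d.modify (PySem.List.pyGetD toks 0 "") [] (fun l => l ++ [toks]))
    (PySem.Dict.empty (κ := String) (ν := List (List String)))

def BMarked (ws : List String) (phr : List (List String)) : PySem.Set Int :=
  (PySem.List.enumerate ws).foldl (fun s iw =>
    ((BDict phr).getD (PySem.Str.lower iw.2) []).foldl (fun s toks =>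
      if PySem.List.len toks == 1 then
        PySem.Set.update s (PySem.List.pyRange (max (iw.1 - 1) 0) (min (iw.1 + 2) (PySem.List.len ws)) 1)
      else if decide (iw.1 + 1 < PySem.List.len ws) &&
              (PySem.Str.lower (PySem.List.pyGetD ws (iw.1 + 1) "") == PySem.List.pyGetD toks 1 "") then
        PySem.Set.update s (PySem.List.pyRange (max (iw.1 - 1) 0) (min (iw.1 + 3) (PySem.List.len ws)) 1)
      else s) s)
    (PySem.Set.empty (α := Int))

def BRun (ws : List String) (phr : List (List String)) : String :=
  PySem.Str.join " " ((PySem.List.enumerate ws).map (fun iw =>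
    if PySem.Set.contains (BMarked ws phr) iw.1 then "*****" else iw.2))

lemma censor_four_alt_eq (text : String) (w1 w2 : List String) :
    censor_four_alt text w1 w2 = BRun (pvSplit text) (pvPhrases w1 w2) := by
  rw [pvPhrases_eq]
  unfold censor_four_alt BRun BMarked BDict
  rw [List.foldl_map]

lemma BDict_getD (phr : List (List String)) (c : String) :
    (BDict phr).getD c [] = phr.filter (fun p => PySem.List.pyGetD p 0 "" == c) := by
  have h := PySem.Dict.getD_foldl_modify_append (phr.map (fun p => (PySem.List.pyGetD p 0 "", p)))
    (PySem.Dict.empty (κ := String) (ν := List (List String))) c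
  rw [List.foldl_map] at h
  simpa [BDict, PySem.Dict.getD_empty, List.filter_map, Function.comp_def] using h

lemma mem_foldl_or {α β : Type} [BEq β] [LawfulBEq β] (f : PySem.Set β → α → PySem.Set β)
    (P : α → β → Prop) (h : ∀ s x y, y ∈ f s x ↔ y ∈ s ∨ P x y) (l : List α) (s : PySem.Set β)
    (y : β) : y ∈ l.foldl f s ↔ y ∈ s ∨ ∃ x ∈ l, P x y := by
  induction l generalizing s with
  | nil => simp
  | cons a t ih =>
      rw [List.foldl_cons, ih, h]
      simp only [List.mem_cons]
      constructor
      · rintro ((hs | hp) | ⟨x, hx, hp⟩)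
        · exact Or.inl hs
        · exact Or.inr ⟨a, Or.inl rfl, hp⟩
        · exact Or.inr ⟨x, Or.inr hx, hp⟩
      · rintro (hs | ⟨x, rfl | hx, hp⟩)
        · exact Or.inl (Or.inl hs)
        · exact Or.inl (Or.inr hp)
        · exact Or.inr ⟨x, hx, hp⟩

-- what a lookup entry toks contributes for word index i in B's loop
def PInner (ws : List String) (i : Int) (toks : List String) (y : Int) : Prop :=
  if toks.length = 1 then max (i - 1) 0 ≤ y ∧ y < min (i + 2) (ws.length : Int)
  else (i + 1 < (ws.length : Int) ∧
        PySem.Str.lower (PySem.List.pyGetD ws (i + 1) "") = PySem.List.pyGetD toks 1 "") ∧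
       max (i - 1) 0 ≤ y ∧ y < min (i + 3) (ws.length : Int)

lemma mem_BMarked (ws : List String) (phr : List (List String)) (y : Int) :
    y ∈ BMarked ws phr ↔ ∃ k : Nat, k < ws.length ∧
      ∃ toks ∈ (BDict phr).getD (PySem.Str.lower (ws.getD k "")) [], PInner ws (k : Int) toks y := by
  have hin : ∀ (i : Int) (s : PySem.Set Int) (toks : List String) (y : Int),
      (y ∈ (if PySem.List.len toks == 1 then
        PySem.Set.update s (PySem.List.pyRange (max (i - 1) 0) (min (i + 2) (PySem.List.len ws)) 1)
      else if decide (i + 1 < PySem.List.len ws) &&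
              (PySem.Str.lower (PySem.List.pyGetD ws (i + 1) "") == PySem.List.pyGetD toks 1 "") then
        PySem.Set.update s (PySem.List.pyRange (max (i - 1) 0) (min (i + 3) (PySem.List.len ws)) 1)
      else s)) ↔ y ∈ s ∨ PInner ws i toks y := by
    intro i s toks y
    unfold PInner
    by_cases h1 : toks.length = 1
    · have hb : (PySem.List.len toks == 1) = true := by simp [PySem.List.len_eq, h1]
      simp [h1, PySem.Set.mem_update, PySem.List.mem_pyRange_one, PySem.List.len_eq]
    · have hb : (PySem.List.len toks == 1) = false := by
        simp [PySem.List.len_eq]; omega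
      rw [if_neg (show ¬((PySem.List.len toks == 1) = true) from by
        simp only [PySem.List.len_eq, beq_iff_eq]; exact_mod_cast h1), if_neg h1]
      by_cases h2 : i + 1 < (ws.length : Int) ∧
          PySem.Str.lower (PySem.List.pyGetD ws (i + 1) "") = PySem.List.pyGetD toks 1 ""
      · rw [if_pos (by simp [PySem.List.len_eq, h2.1, h2.2])]
        simp [PySem.Set.mem_update, PySem.List.mem_pyRange_one, h2]
      · rw [if_neg (by
          simp only [Bool.and_eq_true, decide_eq_true_eq, beq_iff_eq, PySem.List.len_eq]
          intro hc; exact h2 ⟨hc.1, hc.2⟩)]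
        simp [h2]
  have hstep : ∀ (s : PySem.Set Int) (iw : Int × String) (y : Int),
      y ∈ (fun (s : PySem.Set Int) (iw : Int × String) =>
        ((BDict phr).getD (PySem.Str.lower iw.2) []).foldl (fun s toks =>
          if PySem.List.len toks == 1 then
            PySem.Set.update s (PySem.List.pyRange (max (iw.1 - 1) 0) (min (iw.1 + 2) (PySem.List.len ws)) 1)
          else if decide (iw.1 + 1 < PySem.List.len ws) &&
                  (PySem.Str.lower (PySem.List.pyGetD ws (iw.1 + 1) "") == PySem.List.pyGetD toks 1 "") then
            PySem.Set.update s (PySem.List.pyRange (max (iw.1 - 1) 0) (min (iw.1 + 3) (PySem.List.len ws)) 1)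
          else s) s) s iw
      ↔ y ∈ s ∨ ∃ toks ∈ (BDict phr).getD (PySem.Str.lower iw.2) [], PInner ws iw.1 toks y :=
    fun s iw y => mem_foldl_or _ _ (fun s toks y => hin iw.1 s toks y) _ s y
  unfold BMarked
  refine (mem_foldl_or _ _ hstep (PySem.List.enumerate ws) PySem.Set.empty y).trans ?_
  simp only [PySem.Set.empty, List.not_mem_nil, false_or, PySem.List.mem_enumerate_iff]
  constructor
  · rintro ⟨iw, ⟨k, hk, rfl⟩, htoks⟩
    refine ⟨k, hk, ?_⟩
    rw [List.getD_eq_getElem ws "" hk]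
    simpa using htoks
  · rintro ⟨k, hk, htoks⟩
    refine ⟨((0 : Int) + (k : Int), ws[k]), ⟨k, hk, rfl⟩, ?_⟩
    rw [List.getD_eq_getElem ws "" hk] at htoks
    simpa using htoks

lemma mem_pvContrib (ws : List String) (k : Nat) (p : List String) (x : Int) :
    x ∈ pvContrib ws k p ↔
      (p.length = 1 ∧ PySem.Str.lower (ws.getD k "") = PySem.List.pyGetD p 0 "" ∧
        (x = (k : Int) - 1 ∨ x = (k : Int) ∨ x = (k : Int) + 1)) ∨
      (p.length ≠ 1 ∧ PySem.Str.lower (ws.getD k "") = PySem.List.pyGetD p 0 "" ∧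
        PySem.Str.lower (ws.getD (k + 1) "") = PySem.List.pyGetD p 1 "" ∧
        (x = (k : Int) - 1 ∨ x = (k : Int) ∨ x = (k : Int) + 1 ∨ x = (k : Int) + 2)) := by
  unfold pvContrib
  simp only [List.getD_eq_getElem?_getD]
  by_cases h1 : p.length = 1
  · rw [if_pos (by simp [PySem.List.len_eq, h1])]
    by_cases h2 : PySem.Str.lower (ws[k]?.getD "") = PySem.List.pyGetD p 0 ""
    · rw [if_pos (by simp only [beq_iff_eq]; exact h2)]
      simp only [List.mem_cons, List.not_mem_nil, or_false, h1, h2, ne_eq, not_true_eq_false,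
        false_and, true_and]
    · rw [if_neg (by simp only [beq_iff_eq]; exact h2)]
      simp [h1, h2]
  · rw [if_neg (by simp only [PySem.List.len_eq, beq_iff_eq]; exact_mod_cast h1)]
    by_cases h2 : PySem.Str.lower (ws[k]?.getD "") = PySem.List.pyGetD p 0 "" ∧
        PySem.Str.lower (ws[k + 1]?.getD "") = PySem.List.pyGetD p 1 ""
    · rw [if_pos (by simp only [Bool.and_eq_true, beq_iff_eq]; exact ⟨h2.1, h2.2⟩)]
      simp only [List.mem_cons, List.not_mem_nil, or_false, h1, h2.1, h2.2, ne_eq,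
        not_false_eq_true, true_and, false_and, false_or]
    · rw [if_neg (by
        simp only [Bool.and_eq_true, beq_iff_eq]
        intro hc; exact h2 ⟨hc.1, hc.2⟩)]
      simp only [List.not_mem_nil, false_iff]
      rintro (⟨hl, _⟩ | ⟨_, ha, hb, _⟩)
      · exact h1 hl
      · exact h2 ⟨ha, hb⟩

-- B's marked set, as a Prop over abstract inputs
def BM (ws : List String) (phr : List (List String)) (y : Int) : Prop :=
  ∃ k : Nat, k < ws.length ∧
    ((PvMatch1 ws phr k ∧ max ((k : Int) - 1) 0 ≤ y ∧ y < min ((k : Int) + 2) (ws.length : Int)) ∨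
     (PvMatch2 ws phr k ∧ (k : Int) + 1 < (ws.length : Int) ∧
       max ((k : Int) - 1) 0 ≤ y ∧ y < min ((k : Int) + 3) (ws.length : Int)))

lemma BM_iff (ws : List String) (phr : List (List String)) (y : Int) :
    PySem.Set.contains (BMarked ws phr) y = true ↔ BM ws phr y := by
  rw [PySem.Set.contains_iff, mem_BMarked]
  unfold BM
  refine exists_congr fun k => and_congr_right fun hk => ?_
  rw [BDict_getD]
  constructor
  · rintro ⟨toks, htoks, hP⟩
    rw [List.mem_filter] at htoks
    obtain ⟨hmem, hkey⟩ := htoks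
    rw [beq_iff_eq] at hkey
    unfold PInner at hP
    by_cases hlen : toks.length = 1
    · rw [if_pos hlen] at hP
      exact Or.inl ⟨⟨toks, hmem, hlen, hkey.symm⟩, hP⟩
    · rw [if_neg hlen] at hP
      obtain ⟨⟨hg, he⟩, hr⟩ := hP
      refine Or.inr ⟨⟨toks, hmem, hlen, hkey.symm, ?_⟩, hg, hr⟩
      rw [show ((k : Int) + 1) = ((k + 1 : Nat) : Int) from by push_cast; ring,
        PySem.List.pyGetD_natCast] at he
      exact he
  · rintro (⟨⟨p, hmem, hlen, heq⟩, hr⟩ | ⟨⟨p, hmem, hlen, heq, he2⟩, hg, hr⟩)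
    · refine ⟨p, List.mem_filter.2 ⟨hmem, by rw [beq_iff_eq]; exact heq.symm⟩, ?_⟩
      unfold PInner
      rw [if_pos hlen]
      exact hr
    · refine ⟨p, List.mem_filter.2 ⟨hmem, by rw [beq_iff_eq]; exact heq.symm⟩, ?_⟩
      unfold PInner
      rw [if_neg hlen]
      refine ⟨⟨hg, ?_⟩, hr⟩
      rw [show ((k : Int) + 1) = ((k + 1 : Nat) : Int) from by push_cast; ring,
        PySem.List.pyGetD_natCast]
      exact he2

lemma crux (ws : List String) (phr : List (List String))
    (hA1 : ¬ PvMatch1 ws phr (ws.length - 1))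
    (hA2 : ¬ PvMatch2 ws phr (ws.length - 1))
    (hA3 : 2 ≤ ws.length → ¬ PvMatch2 ws phr (ws.length - 2))
    (j : Nat) (hj : j < ws.length) :
    (∃ i ∈ AIdx ws phr, i = (j : Int) ∨ i = (j : Int) - (ws.length : Int)) ↔
      (BM ws phr (j : Int) ∨ (j = ws.length - 1 ∧ (PvMatch1 ws phr 0 ∨ PvMatch2 ws phr 0))) := by
  have hm1 : ∀ k : Nat, k < ws.length → PvMatch1 ws phr k → k + 1 < ws.length := by
    intro k hk hm
    rcases Nat.lt_or_ge (k + 1) ws.length with h | h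
    · exact h
    · have hke : k = ws.length - 1 := by omega
      exact absurd (hke ▸ hm) hA1
  have hm2 : ∀ k : Nat, k < ws.length → PvMatch2 ws phr k → k + 2 < ws.length := by
    intro k hk hm
    have hk1 : k ≠ ws.length - 1 := fun h => hA2 (h ▸ hm)
    by_cases h2n : 2 ≤ ws.length
    · have hk2 : k ≠ ws.length - 2 := fun h => (hA3 h2n) (h ▸ hm)
      omega
    · omega
  constructor
  · rintro ⟨x, hmem, hx⟩
    rw [mem_AIdx] at hmem
    obtain ⟨k, hk, p, hp, hxp⟩ := hmem
    rw [mem_pvContrib] at hxp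
    rcases hxp with ⟨hl, he, hxs⟩ | ⟨hl, he1, he2, hxs⟩
    · have hM : PvMatch1 ws phr k := ⟨p, hp, hl, he⟩
      have hk1 := hm1 k hk hM
      rcases hxs with rfl | rfl | rfl
      · by_cases hk0 : k = 0
        · subst hk0
          right
          refine ⟨by omega, Or.inl hM⟩
        · left
          refine ⟨k, hk, Or.inl ⟨hM, max_le_iff.2 ⟨by omega, by omega⟩, lt_min_iff.2 ⟨by omega, by omega⟩⟩⟩
      · left
        exact ⟨k, hk, Or.inl ⟨hM, max_le_iff.2 ⟨by omega, by omega⟩, lt_min_iff.2 ⟨by omega, by omega⟩⟩⟩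
      · left
        exact ⟨k, hk, Or.inl ⟨hM, max_le_iff.2 ⟨by omega, by omega⟩, lt_min_iff.2 ⟨by omega, by omega⟩⟩⟩
    · have hM : PvMatch2 ws phr k := ⟨p, hp, hl, he1, he2⟩
      have hk2 := hm2 k hk hM
      rcases hxs with rfl | rfl | rfl | rfl
      · by_cases hk0 : k = 0
        · subst hk0
          right
          refine ⟨by omega, Or.inr hM⟩
        · left
          refine ⟨k, hk, Or.inr ⟨hM, by omega, max_le_iff.2 ⟨by omega, by omega⟩, lt_min_iff.2 ⟨by omega, by omega⟩⟩⟩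
      · left
        exact ⟨k, hk, Or.inr ⟨hM, by omega, max_le_iff.2 ⟨by omega, by omega⟩, lt_min_iff.2 ⟨by omega, by omega⟩⟩⟩
      · left
        exact ⟨k, hk, Or.inr ⟨hM, by omega, max_le_iff.2 ⟨by omega, by omega⟩, lt_min_iff.2 ⟨by omega, by omega⟩⟩⟩
      · left
        exact ⟨k, hk, Or.inr ⟨hM, by omega, max_le_iff.2 ⟨by omega, by omega⟩, lt_min_iff.2 ⟨by omega, by omega⟩⟩⟩
  · rintro (⟨k, hk, ⟨⟨p, hp, hl, he⟩, hb1, hb2⟩ | ⟨⟨p, hp, hl, he1, he2⟩, hg, hb1, hb2⟩⟩ | ⟨hj1, hM0⟩)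
    · have hb1' := max_le_iff.1 hb1
      have hb2' := lt_min_iff.1 hb2
      refine ⟨(j : Int), ?_, Or.inl rfl⟩
      rw [mem_AIdx]
      exact ⟨k, hk, p, hp, (mem_pvContrib ws k p (j : Int)).2 (Or.inl ⟨hl, he, by omega⟩)⟩
    · have hb1' := max_le_iff.1 hb1
      have hb2' := lt_min_iff.1 hb2
      refine ⟨(j : Int), ?_, Or.inl rfl⟩
      rw [mem_AIdx]
      exact ⟨k, hk, p, hp, (mem_pvContrib ws k p (j : Int)).2 (Or.inr ⟨hl, he1, he2, by omega⟩)⟩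
    · refine ⟨(j : Int) - (ws.length : Int), ?_, Or.inr rfl⟩
      rw [mem_AIdx]
      rcases hM0 with ⟨p, hp, hl, he⟩ | ⟨p, hp, hl, he1, he2⟩
      · exact ⟨0, by omega, p, hp, (mem_pvContrib ws 0 p _).2 (Or.inl ⟨hl, he, Or.inl (by omega)⟩)⟩
      · exact ⟨0, by omega, p, hp, (mem_pvContrib ws 0 p _).2 (Or.inr ⟨hl, he1, he2, Or.inl (by omega)⟩)⟩

lemma main_eq (ws : List String) (phr : List (List String))
    (hA1 : ¬ PvMatch1 ws phr (ws.length - 1))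
    (hA2 : ¬ PvMatch2 ws phr (ws.length - 1))
    (hA3 : 2 ≤ ws.length → ¬ PvMatch2 ws phr (ws.length - 2))
    (hND : ¬(2 ≤ ws.length ∧ (PvMatch1 ws phr 0 ∨ PvMatch2 ws phr 0) ∧
      ws.getLast? ≠ some "*****" ∧ ¬ PvMatch1 ws phr (ws.length - 2) ∧
      (ws.length = 2 ∨ ¬ PvMatch2 ws phr (ws.length - 3)))) :
    ARun ws phr = BRun ws phr := by
  unfold ARun BRun
  congr 1
  apply List.ext_getElem?
  intro j
  by_cases hj : j < ws.length
  · rw [getElem?_writes _ _ _ hj]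
    rw [List.getElem?_map, PySem.List.getElem?_enumerate, List.getElem?_eq_getElem hj]
    simp only [Option.map_some, zero_add]
    by_cases hBM : BM ws phr (j : Int)
    · rw [if_pos ((crux ws phr hA1 hA2 hA3 j hj).2 (Or.inl hBM)),
        if_pos ((BM_iff ws phr (j : Int)).2 hBM)]
    · have hcont : PySem.Set.contains (BMarked ws phr) (j : Int) = false := by
        rw [Bool.eq_false_iff]
        exact fun h => hBM ((BM_iff ws phr (j : Int)).1 h)
      rw [hcont]
      by_cases hextra : j = ws.length - 1 ∧ (PvMatch1 ws phr 0 ∨ PvMatch2 ws phr 0)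
      · rw [if_pos ((crux ws phr hA1 hA2 hA3 j hj).2 (Or.inr hextra))]
        simp only [Bool.false_eq_true, if_false]
        have h2n : 2 ≤ ws.length := by
          by_contra hn
          have hn1 : ws.length = 1 := by omega
          have hj0 : (0 : Nat) = ws.length - 1 := by omega
          rcases hextra.2 with m | m
          · exact hA1 (hj0 ▸ m)
          · exact hA2 (hj0 ▸ m)
        by_cases c3 : ws.getLast? = some "*****"
        · rw [List.getLast?_eq_getElem?, List.getElem?_eq_getElem (by omega : ws.length - 1 < ws.length)] at c3
          rw [show ws[j] = ws[ws.length - 1]'(by omega) from by congr 1; omega,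
            Option.some_inj.1 c3]
        · by_cases c4 : PvMatch1 ws phr (ws.length - 2)
          · exfalso
            apply hBM
            refine ⟨ws.length - 2, by omega, Or.inl ⟨c4,
              max_le_iff.2 ⟨by omega, by omega⟩, lt_min_iff.2 ⟨by omega, by omega⟩⟩⟩
          · by_cases c5 : 3 ≤ ws.length ∧ PvMatch2 ws phr (ws.length - 3)
            · exfalso
              apply hBM
              refine ⟨ws.length - 3, by omega, Or.inr ⟨c5.2, by omega,
                max_le_iff.2 ⟨by omega, by omega⟩, lt_min_iff.2 ⟨by omega, by omega⟩⟩⟩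
            · refine absurd ⟨h2n, hextra.2, c3, c4, ?_⟩ hND
              by_cases hn2 : ws.length = 2
              · exact Or.inl hn2
              · exact Or.inr fun m => c5 ⟨by omega, m⟩
      · rw [if_neg (fun h => ?_)]
        · simp
        · rcases (crux ws phr hA1 hA2 hA3 j hj).1 h with hc | hc
          · exact hBM hc
          · exact hextra hc
  · rw [List.getElem?_eq_none (by rw [length_writes]; omega),
      List.getElem?_eq_none (by rw [List.length_map, PySem.List.length_enumerate]; omega)]

-- ---- tightness: inside D_ the two outputs always differ ----

lemma go_space_free : ∀ (fuel : Nat) (l cur : List Char) (acc : List (List Char)),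
    l.length < fuel → ' ' ∉ cur → (∀ w ∈ acc, ' ' ∉ w) →
    ∀ w ∈ PySem.Chars.splitOn.go [' '] fuel l cur acc, ' ' ∉ w := by
  intro fuel
  induction fuel with
  | zero => intro l cur acc h; omega
  | succ f ih =>
      intro l cur acc hlen hcur hacc
      cases l with
      | nil =>
          have hstep : PySem.Chars.splitOn.go [' '] (f + 1) [] cur acc
              = (cur.reverse :: acc).reverse := by
            rw [PySem.Chars.splitOn.go]
            omega
          rw [hstep]
          intro w hw
          simp only [List.mem_reverse, List.mem_cons] at hw
          rcases hw with rfl | hw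
          · simpa using hcur
          · exact hacc w hw
      | cons c rest =>
          by_cases hc : c = ' '
          · subst hc
            have hstep : PySem.Chars.splitOn.go [' '] (f + 1) (' ' :: rest) cur acc
                = PySem.Chars.splitOn.go [' '] f rest [] (cur.reverse :: acc) := by
              rw [PySem.Chars.splitOn.go]; simp [List.isPrefixOf]
            rw [hstep]
            refine ih rest [] _ (by simpa using hlen) (by simp) ?_
            intro w hw
            rcases List.mem_cons.1 hw with rfl | hw
            · simpa using hcur
            · exact hacc w hw
          · have hstep : PySem.Chars.splitOn.go [' '] (f + 1) (c :: rest) cur acc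
                = PySem.Chars.splitOn.go [' '] f rest (c :: cur) acc := by
              rw [PySem.Chars.splitOn.go]; simp [List.isPrefixOf, Ne.symm hc]
            rw [hstep]
            refine ih rest (c :: cur) acc (by simpa using hlen) ?_ hacc
            intro h
            rcases List.mem_cons.1 h with h | h
            · exact hc h.symm
            · exact hcur h

lemma pvSplit_space_free (s : String) : ∀ w ∈ pvSplit s, ' ' ∉ w.toList := by
  intro w hw
  unfold pvSplit PySem.Chars.splitOn at hw
  rcases List.mem_map.1 hw with ⟨cs, hcs, rfl⟩
  have h := go_space_free (s.toList.length + 1) s.toList [] [] (by omega) (by simp) (by simp) cs hcs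
  simpa using h

lemma splitsep_inj : ∀ (u v t1 t2 : List Char), ' ' ∉ u → ' ' ∉ v →
    u ++ ' ' :: t1 = v ++ ' ' :: t2 → u = v ∧ t1 = t2 := by
  intro u
  induction u with
  | nil =>
      intro v t1 t2 _ hv h
      cases v with
      | nil => simpa using h
      | cons d v' =>
          simp only [List.nil_append, List.cons_append, List.cons.injEq] at h
          exact absurd (h.1 ▸ List.mem_cons_self ..) hv
  | cons c u' ih =>
      intro v t1 t2 hu hv h
      cases v with
      | nil =>
          simp only [List.cons_append, List.nil_append, List.cons.injEq] at h
          exact absurd (h.1 ▸ List.mem_cons_self ..) hu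
      | cons d v' =>
          simp only [List.cons_append, List.cons.injEq] at h
          obtain ⟨rfl, h2⟩ := h
          obtain ⟨rfl, rfl⟩ := ih v' t1 t2 (fun m => hu (List.mem_cons_of_mem _ m))
            (fun m => hv (List.mem_cons_of_mem _ m)) h2
          exact ⟨rfl, rfl⟩

lemma chars_join_inj : ∀ (us vs : List (List Char)), us.length = vs.length →
    (∀ w ∈ us, ' ' ∉ w) → (∀ w ∈ vs, ' ' ∉ w) →
    PySem.Chars.join [' '] us = PySem.Chars.join [' '] vs → us = vs := by
  intro us
  induction us with
  | nil =>
      intro vs hlen _ _ _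
      cases vs with
      | nil => rfl
      | cons v vs' => simp at hlen
  | cons u us' ih =>
      intro vs hlen hu hv h
      cases vs with
      | nil => simp at hlen
      | cons v vs' =>
          cases us' with
          | nil =>
              cases vs' with
              | nil =>
                  rw [PySem.Chars.join_singleton, PySem.Chars.join_singleton] at h
                  rw [h]
              | cons v2 vs'' => simp at hlen
          | cons u2 us'' =>
              cases vs' with
              | nil => simp at hlen
              | cons v2 vs'' =>
                  rw [PySem.Chars.join_cons_cons, PySem.Chars.join_cons_cons] at h
                  have h' : u ++ ' ' :: PySem.Chars.join [' '] (u2 :: us'')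
                      = v ++ ' ' :: PySem.Chars.join [' '] (v2 :: vs'') := by
                    simpa [List.append_assoc] using h
                  obtain ⟨rfl, hj⟩ := splitsep_inj u v _ _ (hu u (by simp)) (hv v (by simp)) h'
                  have hrest := ih (v2 :: vs'') (by simpa using hlen)
                    (fun w hw => hu w (List.mem_cons_of_mem _ hw))
                    (fun w hw => hv w (List.mem_cons_of_mem _ hw)) hj
                  rw [hrest]

lemma join_inj (us vs : List String) (hlen : us.length = vs.length)
    (hu : ∀ w ∈ us, ' ' ∉ w.toList) (hv : ∀ w ∈ vs, ' ' ∉ w.toList)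
    (h : PySem.Str.join " " us = PySem.Str.join " " vs) : us = vs := by
  have h2 : (PySem.Str.join " " us).toList = (PySem.Str.join " " vs).toList := by rw [h]
  rw [PySem.Str.toList_join, PySem.Str.toList_join] at h2
  have h3 := chars_join_inj (us.map String.toList) (vs.map String.toList)
    (by simpa using hlen)
    (by intro w hw; rcases List.mem_map.1 hw with ⟨x, hx, rfl⟩; exact hu x hx)
    (by intro w hw; rcases List.mem_map.1 hw with ⟨x, hx, rfl⟩; exact hv x hx)
    (by simpa using h2)
  exact List.map_injective_iff.2 (fun a b hab => String.toList_inj.mp hab) h3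

theorem censor_four_spec : Claim_unchanged_censor_four := by
  intro text w1 w2 _hdom hpre hD
  rw [censor_four_eq, censor_four_alt_eq]
  obtain ⟨hM0, h1, h2⟩ := hpre
  apply main_eq
  · exact h1
  · exact matchM0_not _ _ _ hM0
  · intro h2n m
    exact h2 ⟨h2n, m⟩
  · exact hD

theorem censor_four_changed : Claim_changed_censor_four := by
  unfold Claim_changed_censor_four; decide

theorem censor_four_tight : Claim_exact_censor_four := by
  intro text w1 w2 _hdom hpre hD heq
  rw [censor_four_eq, censor_four_alt_eq] at heq
  obtain ⟨hM0, h1, h2⟩ := hpre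
  obtain ⟨hn2, hit0, hlast, hc4, hc5⟩ := hD
  unfold ARun BRun at heq
  have hfree : ∀ w ∈ pvSplit text, ' ' ∉ w.toList := pvSplit_space_free text
  have hstar : ' ' ∉ ("*****" : String).toList := by decide
  have hL1free : ∀ w ∈ (AIdx (pvSplit text) (pvPhrases w1 w2)).foldl
      (fun l index => PySem.List.pySetD l index "*****") (pvSplit text), ' ' ∉ w.toList := by
    intro w hw
    obtain ⟨j, hj⟩ := List.mem_iff_getElem?.1 hw
    have hjlt : j < (pvSplit text).length := by
      by_contra hge
      rw [List.getElem?_eq_none (by rw [length_writes]; omega)] at hj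
      simp at hj
    rw [getElem?_writes _ _ _ hjlt] at hj
    split at hj
    · obtain rfl := Option.some_inj.1 hj
      exact hstar
    · exact hfree w (List.mem_of_getElem? hj)
  have hL2free : ∀ w ∈ (PySem.List.enumerate (pvSplit text)).map (fun iw =>
      if PySem.Set.contains (BMarked (pvSplit text) (pvPhrases w1 w2)) iw.1 then "*****" else iw.2),
      ' ' ∉ w.toList := by
    intro w hw
    rcases List.mem_map.1 hw with ⟨iw, hiw, rfl⟩
    rcases (PySem.List.mem_enumerate_iff _ _ _).1 hiw with ⟨k, hk, rfl⟩
    by_cases hcm : PySem.Set.contains (BMarked (pvSplit text) (pvPhrases w1 w2))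
        ((0 : Int) + (k : Int)) = true
    · simp only [hcm, if_true]
      exact hstar
    · simp only [Bool.not_eq_true] at hcm
      simp only [hcm, Bool.false_eq_true, if_false]
      exact hfree _ (List.getElem_mem hk)
  have hL := join_inj _ _
    (by rw [length_writes, List.length_map, PySem.List.length_enumerate]) hL1free hL2free heq
  -- the two word lists agree, yet they must differ at the last position: contradiction
  have hnBM : ¬ BM (pvSplit text) (pvPhrases w1 w2) (((pvSplit text).length - 1 : Nat) : Int) := by
    rintro ⟨k, hk, ⟨hM, hb1, hb2⟩ | ⟨hM, hg, hb1, hb2⟩⟩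
    · have hb2' := lt_min_iff.1 hb2
      have hcase : k = (pvSplit text).length - 1 ∨ k = (pvSplit text).length - 2 := by omega
      rcases hcase with h | h
      · exact h1 (h ▸ hM)
      · exact hc4 (h ▸ hM)
    · have hb2' := lt_min_iff.1 hb2
      have hcase : k = (pvSplit text).length - 1 ∨ k = (pvSplit text).length - 2 ∨
          (3 ≤ (pvSplit text).length ∧ k = (pvSplit text).length - 3) := by omega
      rcases hcase with h | h | ⟨h3, h⟩
      · exact matchM0_not _ _ _ hM0 (h ▸ hM)
      · exact h2 ⟨hn2, h ▸ hM⟩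
      · rcases hc5 with hn2' | hnc
        · omega
        · exact hnc (h ▸ hM)
  have hcond : ∃ i ∈ AIdx (pvSplit text) (pvPhrases w1 w2),
      i = (((pvSplit text).length - 1 : Nat) : Int) ∨
      i = (((pvSplit text).length - 1 : Nat) : Int) - ((pvSplit text).length : Int) := by
    refine ⟨-1, ?_, Or.inr (by omega)⟩
    rw [mem_AIdx]
    rcases hit0 with ⟨p, hp, hl, he⟩ | ⟨p, hp, hl, he1, he2⟩
    · exact ⟨0, by omega, p, hp, (mem_pvContrib _ 0 p _).2 (Or.inl ⟨hl, he, Or.inl (by norm_num)⟩)⟩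
    · exact ⟨0, by omega, p, hp,
        (mem_pvContrib _ 0 p _).2 (Or.inr ⟨hl, he1, he2, Or.inl (by norm_num)⟩)⟩
  have hA : ((AIdx (pvSplit text) (pvPhrases w1 w2)).foldl
      (fun l index => PySem.List.pySetD l index "*****") (pvSplit text))[(pvSplit text).length - 1]?
      = some "*****" := by
    rw [getElem?_writes _ _ _ (by omega), if_pos hcond]
  have hB : ((PySem.List.enumerate (pvSplit text)).map (fun iw =>
      if PySem.Set.contains (BMarked (pvSplit text) (pvPhrases w1 w2)) iw.1 then "*****"
      else iw.2))[(pvSplit text).length - 1]?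
      = some ((pvSplit text)[(pvSplit text).length - 1]'(by omega)) := by
    rw [List.getElem?_map, PySem.List.getElem?_enumerate, List.getElem?_eq_getElem (by omega)]
    simp only [Option.map_some, zero_add]
    have hcf : PySem.Set.contains (BMarked (pvSplit text) (pvPhrases w1 w2))
        (((pvSplit text).length - 1 : Nat) : Int) = false :=
      Bool.eq_false_iff.mpr (fun h => hnBM ((BM_iff _ _ _).1 h))
    rw [hcf]
    simp
  rw [hL] at hA
  rw [hA] at hB
  apply hlast
  rw [List.getLast?_eq_getElem?,
    List.getElem?_eq_getElem (by omega : (pvSplit text).length - 1 < (pvSplit text).length)]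
  rw [← Option.some_inj.1 hB]
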